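-- pv_equiv track=rewrite | github.com/fury93/leetcode_python3_solutions | 2490-maximum-number-of-books-you-can-take/maximum-number-of-books-you-can-take.py | maximumBooks
-- ===== SOURCE A (Python) =====
-- from typing import List
--
-- def maximumBooks(books: List[int]) -> int:
--     res = 0
--     stack = []
--     for i in range(len(books)):
--         while stack and books[i]<=books[stack[-1][0]]+(i-stack[-1][0]):
--             stack.pop()
--         prev_g_end,prev_g_res = stack[-1] if stack else [-1,0]
--         h = min(i-prev_g_end,books[i])
--         l1,l2 = books[i],books[i]-h+1
--         cur = prev_g_res+(l1+l2)*h//2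
--         stack.append([i,cur])
--         res = max(res,cur)
--     return res
-- ===== SOURCE B (Python) =====
-- from typing import List
--
-- def maximumBooks(books: List[int]) -> int:
--     n = len(books)
--     cur = [0] * n
--     best = 0
--     for i in range(n):
--         j = i - 1
--         while j >= 0 and books[j] - j >= books[i] - i:
--             j -= 1
--         h = min(i - j, books[i])
--         run = (2 * books[i] - h + 1) * h // 2
--         cur[i] = (cur[j] if j >= 0 else 0) + run
--         best = max(best, cur[i])
--     return best
-- ===== Notes on version B (the rewrite author's own statement) =====
-- stated objective: simpler
-- what changed: Replaced the monotonic stack (pop-while, pair stack entries) by the canonical quadratic DP: for each shelf a direct backward scan to the nearest index with smaller books[j]-j plus a memoized dp list.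
import Mathlib
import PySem

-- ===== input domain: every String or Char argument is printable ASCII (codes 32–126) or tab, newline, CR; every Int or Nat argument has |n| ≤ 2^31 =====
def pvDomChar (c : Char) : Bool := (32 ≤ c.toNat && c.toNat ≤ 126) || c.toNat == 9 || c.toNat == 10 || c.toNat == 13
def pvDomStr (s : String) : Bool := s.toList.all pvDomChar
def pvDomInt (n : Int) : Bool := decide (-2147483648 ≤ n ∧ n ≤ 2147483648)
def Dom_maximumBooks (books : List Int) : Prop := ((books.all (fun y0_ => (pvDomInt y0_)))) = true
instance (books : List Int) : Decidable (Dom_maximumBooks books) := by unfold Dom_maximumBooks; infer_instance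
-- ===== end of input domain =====

-- B replaces A's monotonic stack by the canonical quadratic DP (backward nearest-smaller scan + dp list); objective: simpler.

-- ===== PORT A =====
-- the 'while stack and books[i] <= books[stack[-1][0]] + (i - stack[-1][0]): stack.pop()' loop
-- (stack represented with its top at the head; indices pushed are loop indices, hence in range, so pyGetD is exact)
def pvPopA (books : List Int) (i : Int) : List (Int × Int) → List (Int × Int)
  | [] => []
  | (j, v) :: rest =>
      if PySem.List.pyGetD books i 0 ≤ PySem.List.pyGetD books j 0 + (i - j) then
        pvPopA books i rest
      else (j, v) :: rest

-- 'stack[-1] if stack else [-1, 0]'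
def pvHeadD : List (Int × Int) → Int × Int
  | [] => (-1, 0)
  | p :: _ => p

-- one iteration of A's for-loop over state (res, stack)
def pvStepA (books : List Int) (st : Int × List (Int × Int)) (i : Int) : Int × List (Int × Int) :=
  let stack := pvPopA books i st.2
  let pg := pvHeadD stack
  let bi := PySem.List.pyGetD books i 0
  let h := min (i - pg.1) bi
  let l1 := bi
  let l2 := bi - h + 1
  let cur := pg.2 + PySem.Int.floordiv ((l1 + l2) * h) 2
  (max st.1 cur, (i, cur) :: stack)

def maximumBooks (books : List Int) : Int :=
  ((PySem.List.pyRange 0 (books.length : Int) 1).foldl (pvStepA books) (0, [])).1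

-- ===== PORT B =====
-- B's inner while loop: j runs i-1, i-2, … while books[j]-j >= ci; fuel = number of remaining candidates
def pvFindPrev (books : List Int) (ci : Int) : Nat → Int
  | 0 => -1
  | k + 1 =>
      if PySem.List.pyGetD books (k : Int) 0 - (k : Int) ≥ ci then pvFindPrev books ci k
      else (k : Int)

-- B's for-loop: returns (the dp list cur[0..m-1], best so far)
def pvAltLoop (books : List Int) : Nat → List Int × Int
  | 0 => ([], 0)
  | m + 1 =>
      let p := pvAltLoop books m
      let i : Int := (m : Int)
      let bi := PySem.List.pyGetD books i 0
      let j := pvFindPrev books (bi - i) m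
      let h := min (i - j) bi
      let run := PySem.Int.floordiv ((2 * bi - h + 1) * h) 2
      let c := (if 0 ≤ j then PySem.List.pyGetD p.1 j 0 else 0) + run
      (p.1 ++ [c], max p.2 c)

def maximumBooks_alt (books : List Int) : Int := (pvAltLoop books books.length).2

-- ===== PRECONDITION & SPEC =====
def Spec_maximumBooks (books : List Int) (out : Int) : Prop := out = maximumBooks_alt books
instance (books : List Int) (out : Int) : Decidable (Spec_maximumBooks books out) := by unfold Spec_maximumBooks; infer_instance

-- ===== CLAIM (what is proved, stated in full; the proofs are below) =====
def Claim_equal_maximumBooks : Prop := ∀ (books : List Int), Dom_maximumBooks books → Spec_maximumBooks books (maximumBooks books)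

-- ===== LEMMAS AND PROOFS =====

theorem pvFindPrev_bounds (books : List Int) (ci : Int) (k : Nat) :
    -1 ≤ pvFindPrev books ci k ∧ pvFindPrev books ci k < (k : Int) := by
  induction k with
  | zero => simp [pvFindPrev]
  | succ k ih =>
      unfold pvFindPrev
      split
      · exact ⟨ih.1, by have := ih.2; push_cast; omega⟩
      · constructor <;> push_cast <;> omega

theorem pvFindPrev_lt_ci (books : List Int) (ci : Int) (k : Nat)
    (h : 0 ≤ pvFindPrev books ci k) :
    PySem.List.pyGetD books (pvFindPrev books ci k) 0 - pvFindPrev books ci k < ci := by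
  induction k with
  | zero => simp [pvFindPrev] at h
  | succ k ih =>
      unfold pvFindPrev at h ⊢
      by_cases hc : PySem.List.pyGetD books (k : Int) 0 - (k : Int) ≥ ci
      · rw [if_pos hc] at h ⊢
        exact ih h
      · rw [if_neg hc] at h ⊢
        omega

theorem pvFindPrev_ge (books : List Int) (ci : Int) (k : Nat) (m : Nat)
    (h1 : pvFindPrev books ci k < (m : Int)) (h2 : m < k) :
    ci ≤ PySem.List.pyGetD books (m : Int) 0 - (m : Int) := by
  induction k with
  | zero => omega
  | succ k ih =>
      unfold pvFindPrev at h1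
      by_cases hc : PySem.List.pyGetD books (k : Int) 0 - (k : Int) ≥ ci
      · rw [if_pos hc] at h1
        rcases Nat.lt_or_ge m k with hm | hm
        · exact ih h1 hm
        · have : m = k := by omega
          subst this; exact hc
      · rw [if_neg hc] at h1
        omega

-- uniqueness of the "nearest previous smaller" characterization
theorem pvPrev_unique (books : List Int) (ci : Int) (k : Nat) (j1 j2 : Int)
    (b1 : -1 ≤ j1) (l1 : j1 < (k : Int))
    (s1 : 0 ≤ j1 → PySem.List.pyGetD books j1 0 - j1 < ci)
    (a1 : ∀ m : Nat, j1 < (m : Int) → m < k → ci ≤ PySem.List.pyGetD books (m : Int) 0 - (m : Int))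
    (b2 : -1 ≤ j2) (l2 : j2 < (k : Int))
    (s2 : 0 ≤ j2 → PySem.List.pyGetD books j2 0 - j2 < ci)
    (a2 : ∀ m : Nat, j2 < (m : Int) → m < k → ci ≤ PySem.List.pyGetD books (m : Int) 0 - (m : Int)) :
    j1 = j2 := by
  rcases lt_trichotomy j1 j2 with h | h | h
  · exfalso
    have hj2 : 0 ≤ j2 := by omega
    have hcast : ((j2.toNat : Nat) : Int) = j2 := Int.toNat_of_nonneg hj2
    have h1 := a1 j2.toNat (by omega) (by omega)
    rw [hcast] at h1
    have h2 := s2 hj2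
    omega
  · exact h
  · exfalso
    have hj1 : 0 ≤ j1 := by omega
    have hcast : ((j1.toNat : Nat) : Int) = j1 := Int.toNat_of_nonneg hj1
    have h1 := a2 j1.toNat (by omega) (by omega)
    rw [hcast] at h1
    have h2 := s1 hj1
    omega

-- dp value of shelf i (books[i] contributes): dp at the previous smaller index plus the arithmetic run
def pvCur (books : List Int) (i : Nat) : Int :=
  let j := pvFindPrev books (PySem.List.pyGetD books (i : Int) 0 - (i : Int)) i
  let bi := PySem.List.pyGetD books (i : Int) 0
  let h := min ((i : Int) - j) bi
  (if _hj : 0 ≤ j then pvCur books j.toNat else 0)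
    + PySem.Int.floordiv ((2 * bi - h + 1) * h) 2
termination_by i
decreasing_by
  have := pvFindPrev_bounds books (PySem.List.pyGetD books (i : Int) 0 - (i : Int)) i
  omega

theorem pvCur_eq (books : List Int) (i : Nat) :
    pvCur books i
      = (if _ : 0 ≤ pvFindPrev books (PySem.List.pyGetD books (i : Int) 0 - (i : Int)) i then
          pvCur books (pvFindPrev books (PySem.List.pyGetD books (i : Int) 0 - (i : Int)) i).toNat
        else 0)
        + PySem.Int.floordiv
            ((2 * PySem.List.pyGetD books (i : Int) 0
                - min ((i : Int) - pvFindPrev books (PySem.List.pyGetD books (i : Int) 0 - (i : Int)) i)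
                      (PySem.List.pyGetD books (i : Int) 0) + 1)
              * min ((i : Int) - pvFindPrev books (PySem.List.pyGetD books (i : Int) 0 - (i : Int)) i)
                    (PySem.List.pyGetD books (i : Int) 0)) 2 := by
  rw [pvCur]

-- the chain of "previous smaller" indices starting at i, with their dp values (= A's stack, top first)
def pvChain (books : List Int) (i : Nat) : List (Int × Int) :=
  ((i : Int), pvCur books i) ::
    (if _hj : 0 ≤ pvFindPrev books (PySem.List.pyGetD books (i : Int) 0 - (i : Int)) i then
        pvChain books (pvFindPrev books (PySem.List.pyGetD books (i : Int) 0 - (i : Int)) i).toNat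
      else [])
termination_by i
decreasing_by
  have := pvFindPrev_bounds books (PySem.List.pyGetD books (i : Int) 0 - (i : Int)) i
  omega

def pvChainO (books : List Int) (j : Int) : List (Int × Int) :=
  if 0 ≤ j then pvChain books j.toNat else []

def pvBest (books : List Int) : Nat → Int
  | 0 => 0
  | m + 1 => max (pvBest books m) (pvCur books m)

theorem pvChain_eq (books : List Int) (i : Nat) :
    pvChain books i = ((i : Int), pvCur books i) ::
      pvChainO books (pvFindPrev books (PySem.List.pyGetD books (i : Int) 0 - (i : Int)) i) := by
  rw [pvChain, pvChainO]
  split <;> rfl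

theorem pvChainO_natCast (books : List Int) (k : Nat) :
    pvChainO books ((k : Nat) : Int) = pvChain books k := by
  rw [pvChainO, if_pos (by omega : (0:Int) ≤ ((k:Nat):Int)), Int.toNat_natCast]

-- key lemma: popping A's stack (= a chain) leaves the chain of the backward-scan result
theorem pvPop_chain (books : List Int) (i : Nat) : ∀ n : Nat, ∀ j : Int,
    (j + 1).toNat ≤ n → -1 ≤ j → j < (i : Int) →
    (∀ m : Nat, j < (m : Int) → m < i →
      PySem.List.pyGetD books (i : Int) 0 - (i : Int) ≤ PySem.List.pyGetD books (m : Int) 0 - (m : Int)) →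
    pvPopA books (i : Int) (pvChainO books j)
      = pvChainO books (pvFindPrev books (PySem.List.pyGetD books (i : Int) 0 - (i : Int)) i) := by
  intro n
  induction n with
  | zero =>
      intro j hn hb hlt hall
      have hj : j = -1 := by omega
      subst hj
      rw [pvChainO, if_neg (by omega)]
      rw [show pvPopA books (i : Int) [] = [] from rfl, pvChainO]
      rw [if_neg ?hpneg]
      case hpneg =>
        intro hp
        have hb' := pvFindPrev_bounds books (PySem.List.pyGetD books (i : Int) 0 - (i : Int)) i
        have hcast : (((pvFindPrev books (PySem.List.pyGetD books (i : Int) 0 - (i : Int)) i).toNat : Nat) : Int)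
            = pvFindPrev books (PySem.List.pyGetD books (i : Int) 0 - (i : Int)) i :=
          Int.toNat_of_nonneg hp
        have h1 := hall (pvFindPrev books (PySem.List.pyGetD books (i : Int) 0 - (i : Int)) i).toNat
          (by omega) (by omega)
        rw [hcast] at h1
        have h2 := pvFindPrev_lt_ci books (PySem.List.pyGetD books (i : Int) 0 - (i : Int)) i hp
        omega
  | succ n ih =>
      intro j hn hb hlt hall
      by_cases hj : 0 ≤ j
      · obtain ⟨jn, rfl⟩ : ∃ jn : Nat, ((jn : Nat) : Int) = j := ⟨j.toNat, Int.toNat_of_nonneg hj⟩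
        rw [pvChainO_natCast, pvChain_eq books jn]
        simp only [pvPopA]
        by_cases hc : PySem.List.pyGetD books (i : Int) 0
            ≤ PySem.List.pyGetD books ((jn : Nat) : Int) 0 + ((i : Int) - ((jn : Nat) : Int))
        · rw [if_pos hc]
          have hbp := pvFindPrev_bounds books
            (PySem.List.pyGetD books ((jn : Nat) : Int) 0 - ((jn : Nat) : Int)) jn
          apply ih _ (by omega) (by omega) (by omega)
          intro m hm1 hm2
          rcases Nat.lt_or_ge m jn with hmlt | hmge
          · have h3 := pvFindPrev_ge books
              (PySem.List.pyGetD books ((jn : Nat) : Int) 0 - ((jn : Nat) : Int)) jn m hm1 hmlt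
            omega
          · rcases Nat.lt_or_ge jn m with hgt | hle
            · exact hall m (by omega) hm2
            · have hmeq : m = jn := by omega
              subst hmeq
              omega
        · rw [if_neg hc]
          have hjeq : ((jn : Nat) : Int)
              = pvFindPrev books (PySem.List.pyGetD books (i : Int) 0 - (i : Int)) i := by
            have hb' := pvFindPrev_bounds books (PySem.List.pyGetD books (i : Int) 0 - (i : Int)) i
            apply pvPrev_unique books (PySem.List.pyGetD books (i : Int) 0 - (i : Int)) i _ _ hb hlt
            · intro _; omega
            · exact hall
            · exact hb'.1
            · exact hb'.2
            · intro hp; exact pvFindPrev_lt_ci books _ i hp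
            · intro m hm1 hm2; exact pvFindPrev_ge books _ i m hm1 hm2
          rw [← pvChain_eq, ← hjeq, pvChainO_natCast]
      · have hj' : j = -1 := by omega
        subst hj'
        rw [pvChainO, if_neg (by omega)]
        rw [show pvPopA books (i : Int) [] = [] from rfl, pvChainO]
        rw [if_neg ?hpneg2]
        case hpneg2 =>
          intro hp
          have hb' := pvFindPrev_bounds books (PySem.List.pyGetD books (i : Int) 0 - (i : Int)) i
          have hcast : (((pvFindPrev books (PySem.List.pyGetD books (i : Int) 0 - (i : Int)) i).toNat : Nat) : Int)
              = pvFindPrev books (PySem.List.pyGetD books (i : Int) 0 - (i : Int)) i :=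
            Int.toNat_of_nonneg hp
          have h1 := hall (pvFindPrev books (PySem.List.pyGetD books (i : Int) 0 - (i : Int)) i).toNat
            (by omega) (by omega)
          rw [hcast] at h1
          have h2 := pvFindPrev_lt_ci books (PySem.List.pyGetD books (i : Int) 0 - (i : Int)) i hp
          omega

-- the head A reads ('stack[-1] if stack else [-1,0]') of a chain
theorem pvHead_chainO (books : List Int) (j : Int) (hb : -1 ≤ j) :
    pvHeadD (pvChainO books j)
      = (j, if _ : 0 ≤ j then pvCur books j.toNat else 0) := by
  by_cases hj : 0 ≤ j
  · obtain ⟨jn, rfl⟩ : ∃ jn : Nat, ((jn : Nat) : Int) = j := ⟨j.toNat, Int.toNat_of_nonneg hj⟩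
    rw [pvChainO_natCast, pvChain_eq, dif_pos hj, Int.toNat_natCast]
    rfl
  · rw [pvChainO, if_neg hj, dif_neg hj]
    have : j = -1 := by omega
    subst this
    rfl

-- one step of A, expressed through pvCur / chains
theorem pvStepA_eq (books : List Int) (m : Nat) (r : Int) :
    pvStepA books (r, pvChainO books ((m : Int) - 1)) (m : Int)
      = (max r (pvCur books m), pvChainO books (m : Int)) := by
  have hb := pvFindPrev_bounds books (PySem.List.pyGetD books (m : Int) 0 - (m : Int)) m
  have hpop : pvPopA books (m : Int) (pvChainO books ((m : Int) - 1))
      = pvChainO books (pvFindPrev books (PySem.List.pyGetD books (m : Int) 0 - (m : Int)) m) := by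
    apply pvPop_chain books m m ((m : Int) - 1) (by omega) (by omega) (by omega)
    intro k hk1 hk2
    omega
  have hcur : (if _ : 0 ≤ pvFindPrev books (PySem.List.pyGetD books (m : Int) 0 - (m : Int)) m then
        pvCur books (pvFindPrev books (PySem.List.pyGetD books (m : Int) 0 - (m : Int)) m).toNat
      else 0)
      + PySem.Int.floordiv
          ((PySem.List.pyGetD books (m : Int) 0
              + (PySem.List.pyGetD books (m : Int) 0
                  - min ((m : Int) - pvFindPrev books (PySem.List.pyGetD books (m : Int) 0 - (m : Int)) m)
                        (PySem.List.pyGetD books (m : Int) 0) + 1))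
            * min ((m : Int) - pvFindPrev books (PySem.List.pyGetD books (m : Int) 0 - (m : Int)) m)
                  (PySem.List.pyGetD books (m : Int) 0)) 2
      = pvCur books m := by
    rw [pvCur_eq books m]
    congr 2
    ring
  simp only [pvStepA]
  rw [hpop, pvHead_chainO books _ hb.1]
  simp only
  rw [hcur, pvChainO_natCast, pvChain_eq books m]

-- A's whole fold
theorem pvFoldA (books : List Int) : ∀ m : Nat,
    (PySem.List.pyRange 0 (m : Int) 1).foldl (pvStepA books) (0, [])
      = (pvBest books m, pvChainO books ((m : Int) - 1)) := by
  intro m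
  induction m with
  | zero =>
      rw [PySem.List.pyRange_one_eq_nil (by omega)]
      simp [pvBest, pvChainO]
  | succ m ih =>
      rw [show ((m + 1 : Nat) : Int) = (m : Int) + 1 from by push_cast; ring,
        PySem.List.pyRange_one_succ_right (by omega), List.foldl_append, ih]
      simp only [List.foldl_cons, List.foldl_nil]
      rw [show (m : Int) + 1 - 1 = (m : Int) from by ring]
      exact pvStepA_eq books m (pvBest books m)

theorem pvGetD_map_range (books : List Int) (m : Nat) (j : Int) (h0 : 0 ≤ j) (h1 : j < (m : Int)) :
    PySem.List.pyGetD ((List.range m).map (fun k => pvCur books k)) j 0 = pvCur books j.toNat := by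
  obtain ⟨jn, rfl⟩ : ∃ jn : Nat, ((jn : Nat) : Int) = j := ⟨j.toNat, Int.toNat_of_nonneg h0⟩
  rw [Int.toNat_natCast, PySem.List.pyGetD_natCast]
  have hjm : jn < m := by exact_mod_cast h1
  rw [List.getD_eq_getElem?_getD]
  simp [hjm]

-- B's whole fold
theorem pvFoldB (books : List Int) : ∀ m : Nat,
    pvAltLoop books m = ((List.range m).map (fun k => pvCur books k), pvBest books m) := by
  intro m
  induction m with
  | zero => simp [pvAltLoop, pvBest]
  | succ m ih =>
      have hb := pvFindPrev_bounds books (PySem.List.pyGetD books (m : Int) 0 - (m : Int)) m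
      have hc : (if 0 ≤ pvFindPrev books (PySem.List.pyGetD books (m : Int) 0 - (m : Int)) m then
            PySem.List.pyGetD ((List.range m).map (fun k => pvCur books k))
              (pvFindPrev books (PySem.List.pyGetD books (m : Int) 0 - (m : Int)) m) 0
          else 0)
          + PySem.Int.floordiv
              ((2 * PySem.List.pyGetD books (m : Int) 0
                  - min ((m : Int) - pvFindPrev books (PySem.List.pyGetD books (m : Int) 0 - (m : Int)) m)
                        (PySem.List.pyGetD books (m : Int) 0) + 1)
                * min ((m : Int) - pvFindPrev books (PySem.List.pyGetD books (m : Int) 0 - (m : Int)) m)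
                      (PySem.List.pyGetD books (m : Int) 0)) 2
          = pvCur books m := by
        rw [pvCur_eq books m]
        congr 1
        by_cases hp : 0 ≤ pvFindPrev books (PySem.List.pyGetD books (m : Int) 0 - (m : Int)) m
        · rw [if_pos hp, dif_pos hp, pvGetD_map_range books m _ hp hb.2]
        · rw [if_neg hp, dif_neg hp]
      simp only [pvAltLoop, ih]
      rw [hc, List.range_succ, List.map_append, List.map_cons, List.map_nil, pvBest]

-- ===== VERDICT (by name: the statement is the Claim_ definition above) =====
theorem maximumBooks_spec : Claim_equal_maximumBooks := by
  intro books _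
  unfold Spec_maximumBooks maximumBooks maximumBooks_alt
  rw [pvFoldA books books.length, pvFoldB books books.length]
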